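-- pv_equiv track=rewrite | github.com/siva-kumar-python/leetcode_problems | 3754-concatenate-non-zero-digits-and-multiply-by-sum-i/3754-concatenate-non-zero-digits-and-multiply-by-sum-i.py | sumAndMultiply
-- ===== SOURCE A (Python) =====
-- def sumAndMultiply(n: int) -> int:
--     if n==0:
--         return 0
--     x=str(n).replace('0','')
--     ans=0
--     for i in x:
--         ans+=int(i)
--     return int(x)*ans
-- ===== SOURCE B (Python) =====
-- def sumAndMultiply(n: int) -> int:
--     ans = 0
--     s = 0
--     place = 1
--     m = n
--     while m > 0:
--         d = m % 10
--         m //= 10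
--         if d != 0:
--             ans += d * place
--             place *= 10
--             s += d
--     return ans * s
-- ===== Notes on version B (the rewrite author's own statement) =====
-- stated objective: alternative
-- what changed: Replaces the string pipeline (str(n), strip '0' characters, per-character int and a final int() parse) by a purely arithmetic loop that peels digits with n % 10 / n // 10 and rebuilds the concatenated non-zero-digit number with a place-value accumulator.
import Mathlib
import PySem

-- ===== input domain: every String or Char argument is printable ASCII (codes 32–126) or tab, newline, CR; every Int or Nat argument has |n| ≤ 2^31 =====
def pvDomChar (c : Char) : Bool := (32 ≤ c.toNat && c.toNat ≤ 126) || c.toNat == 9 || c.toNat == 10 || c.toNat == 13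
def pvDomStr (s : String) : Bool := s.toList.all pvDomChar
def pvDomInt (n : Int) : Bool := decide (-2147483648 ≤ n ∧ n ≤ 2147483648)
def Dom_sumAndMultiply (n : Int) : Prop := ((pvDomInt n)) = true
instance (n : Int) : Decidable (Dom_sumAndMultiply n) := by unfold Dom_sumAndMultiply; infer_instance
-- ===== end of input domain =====

-- B replaces A's string pipeline (str(n) / remove '0' chars / int() parses) by a purely
-- arithmetic digit loop with a place-value accumulator; same cost, no string traffic.

-- ===== PORT A =====
-- hand port of Python int(s), exact on NONEMPTY PURE-DIGIT strings — the only strings A's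
-- final int(x) receives under Pre_ (x = str(n) with its '0' characters removed, n > 0).
def pyIntDigits (cs : List Char) : Int :=
  cs.foldl (fun a c => a * 10 + ((c.toNat : Int) - 48)) 0

def sumAndMultiply (n : Int) : Int :=
  if n = 0 then 0
  else
    -- x = str(n).replace('0','')
    let x : List Char := PySem.Chars.replace (PySem.Int.toChars n) ['0'] []
    -- for i in x: ans += int(i)   (int on a one-character string, via PySem)
    let ans : Int := x.foldl (fun a c => a + (PySem.Int.ofChars? [c]).getD 0) 0
    -- return int(x) * ans
    pyIntDigits x * ans

-- ===== PORT B =====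
def altLoop (m ans place s : Int) : Int × Int :=
  if 0 < m then
    let d := PySem.Int.mod m 10
    let m' := PySem.Int.floordiv m 10
    if d ≠ 0 then altLoop m' (ans + d * place) (place * 10) (s + d)
    else altLoop m' ans place s
  else (ans, s)
termination_by m.toNat
decreasing_by
  all_goals
    have h10 : (0:Int) < 10 := by norm_num
    rw [PySem.Int.floordiv_eq_ediv_of_pos h10]
    omega

def sumAndMultiply_alt (n : Int) : Int :=
  let p := altLoop n 0 1 0
  p.1 * p.2

-- ===== PRECONDITION & SPEC =====
-- Pre_ excludes n < 0, where A raises ValueError (int('-') on the kept '-' character).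
def Pre_sumAndMultiply (n : Int) : Prop := 0 ≤ n
instance (n : Int) : Decidable (Pre_sumAndMultiply n) := by unfold Pre_sumAndMultiply; infer_instance
def pvWitness_sumAndMultiply : Int := 305

def Spec_sumAndMultiply (n : Int) (out : Int) : Prop := out = sumAndMultiply_alt n
instance (n : Int) (out : Int) : Decidable (Spec_sumAndMultiply n out) := by unfold Spec_sumAndMultiply; infer_instance

-- ===== CLAIM (what is proved, stated in full; the proofs are below) =====
def Claim_equal_sumAndMultiply : Prop := ∀ (n : Int), Dom_sumAndMultiply n → Pre_sumAndMultiply n → Spec_sumAndMultiply n (sumAndMultiply n)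

-- ===== LEMMAS AND PROOFS =====

-- digit value of a character
def cval (c : Char) : Int := (c.toNat : Int) - 48
-- the non-'0' characters of str(m)
def Fz (m : Nat) : List Char := (Nat.toDigits 10 m).filter (fun c => c ≠ '0')
def Vv (cs : List Char) : Int := pyIntDigits cs
def Sv (cs : List Char) : Int := cs.foldl (fun a c => a + cval c) 0

lemma replace_go_filter (fuel : Nat) : ∀ (l acc : List Char), l.length ≤ fuel →
    PySem.Chars.replace.go ['0'] [] fuel l acc
      = acc.reverse ++ l.filter (fun c => c ≠ '0') := by
  induction fuel with
  | zero =>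
    intro l acc h
    have hl : l = [] := by cases l <;> simp_all
    subst hl
    rw [PySem.Chars.replace.go]
    simp
  | succ f ih =>
    intro l acc h
    cases l with
    | nil =>
      rw [PySem.Chars.replace.go]
      · simp
      · omega
    | cons c t =>
      rw [PySem.Chars.replace.go]
      by_cases hc : c = '0'
      · subst hc
        have hp : (['0'] : List Char).isPrefixOf ('0' :: t) = true := by
          simp [List.isPrefixOf]
        simp only [hp, if_true]
        rw [ih _ _ (by simpa using Nat.le_of_succ_le_succ h)]
        simp
      · have hp : (['0'] : List Char).isPrefixOf (c :: t) = false := by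
          simp [List.isPrefixOf]
          exact fun hh => hc hh.symm
        simp only [hp, Bool.false_eq_true, if_false]
        rw [ih _ _ (by simpa using Nat.le_of_succ_le_succ h)]
        simp [hc]

lemma replace_zero_filter (cs : List Char) :
    PySem.Chars.replace cs ['0'] [] = cs.filter (fun c => c ≠ '0') := by
  rw [PySem.Chars.replace]
  rw [if_neg (by simp)]
  rw [replace_go_filter cs.length cs [] (le_refl _)]
  simp

lemma mem_toDigits_digitChar (m : Nat) : ∀ c ∈ Nat.toDigits 10 m, ∃ d, d < 10 ∧ c = Nat.digitChar d := by
  induction m using Nat.strong_induction_on with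
  | _ m ih =>
    intro c hc
    rw [Nat.toDigits_eq_if (by norm_num)] at hc
    by_cases hm : m < 10
    · simp [hm] at hc
      exact ⟨m, hm, hc⟩
    · simp [hm] at hc
      rcases hc with hc | hc
      · exact ih (m / 10) (by omega) c hc
      · exact ⟨m % 10, by omega, hc⟩

lemma ofChars_digitChar {d : Nat} (hd : d < 10) :
    (PySem.Int.ofChars? [Nat.digitChar d]).getD 0 = (d : Int) := by
  interval_cases d <;> decide

lemma cval_digitChar {d : Nat} (hd : d < 10) : cval (Nat.digitChar d) = (d : Int) := by
  interval_cases d <;> decide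

lemma digitChar_ne_zero {d : Nat} (hd : d < 10) : (Nat.digitChar d ≠ '0') ↔ d ≠ 0 := by
  interval_cases d <;> simp <;> decide

lemma Fz_zero : Fz 0 = [] := by decide

lemma Fz_decomp (m : Nat) (hm : 1 ≤ m) :
    Fz m = Fz (m / 10) ++ (if m % 10 = 0 then [] else [Nat.digitChar (m % 10)]) := by
  unfold Fz
  by_cases hlt : m < 10
  · have h1 : m / 10 = 0 := by omega
    have h2 : m % 10 = m := by omega
    rw [Nat.toDigits_of_lt_base hlt, h1, h2]
    have h0 : Nat.toDigits 10 0 = ['0'] := Nat.toDigits_zero 10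
    rw [h0]
    have hne : Nat.digitChar m ≠ '0' := (digitChar_ne_zero hlt).mpr (by omega)
    have hm0 : ¬ (m = 0) := by omega
    simp [List.filter, hne, hm0]
  · rw [Nat.toDigits_of_base_le (by norm_num) (by omega)]
    rw [List.filter_append]
    congr 1
    by_cases hz : m % 10 = 0
    · simp [hz, List.filter]
      rfl
    · have := (digitChar_ne_zero (show m % 10 < 10 by omega)).mpr hz
      simp [hz, List.filter, this]

lemma Vv_append_digit (cs : List Char) (c : Char) :
    Vv (cs ++ [c]) = 10 * Vv cs + cval c := by
  unfold Vv pyIntDigits cval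
  rw [List.foldl_append]
  simp [List.foldl]
  ring

lemma Sv_append_digit (cs : List Char) (c : Char) :
    Sv (cs ++ [c]) = Sv cs + cval c := by
  unfold Sv
  rw [List.foldl_append]
  simp [List.foldl]

lemma altLoop_spec (m : Nat) : ∀ ans place s : Int,
    altLoop (m : Int) ans place s = (ans + place * Vv (Fz m), s + Sv (Fz m)) := by
  induction m using Nat.strong_induction_on with
  | _ m ih =>
    intro ans place s
    by_cases hm : m = 0
    · subst hm
      rw [altLoop]
      simp [Fz_zero, Vv, Sv, pyIntDigits]
    · rw [altLoop]
      have hpos : (0:Int) < (m:Int) := by exact_mod_cast Nat.pos_of_ne_zero hm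
      rw [if_pos hpos]
      have hmod : PySem.Int.mod (m:Int) 10 = ((m % 10 : Nat) : Int) := by
        exact_mod_cast PySem.Int.mod_natCast m 10
      have hdiv : PySem.Int.floordiv (m:Int) 10 = ((m / 10 : Nat) : Int) := by
        exact_mod_cast PySem.Int.floordiv_natCast m 10
      have hdec : Fz m = Fz (m / 10) ++ (if m % 10 = 0 then [] else [Nat.digitChar (m % 10)]) :=
        Fz_decomp m (by omega)
      simp only [hmod, hdiv]
      by_cases hz : m % 10 = 0
      · rw [if_neg (by simp [hz])]
        rw [ih (m / 10) (by omega)]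
        rw [hdec]
        simp [hz]
      · rw [if_pos (by exact_mod_cast hz)]
        rw [ih (m / 10) (by omega)]
        rw [hdec]
        simp only [hz, if_false]
        rw [Vv_append_digit, Sv_append_digit]
        rw [cval_digitChar (show m % 10 < 10 by omega)]
        simp only [Prod.mk.injEq]
        constructor <;> ring

lemma ans_eq_Sv (m : Nat) :
    (Fz m).foldl (fun a c => a + (PySem.Int.ofChars? [c]).getD 0) 0 = Sv (Fz m) := by
  unfold Sv
  apply PySem.List.foldl_congr_mem
  intro acc c hc
  have hmem : c ∈ Nat.toDigits 10 m := List.mem_of_mem_filter hc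
  obtain ⟨d, hd, rfl⟩ := mem_toDigits_digitChar m c hmem
  rw [ofChars_digitChar hd, cval_digitChar hd]

-- ===== VERDICT (by name: the statement is the Claim_ definition above) =====
theorem sumAndMultiply_spec : Claim_equal_sumAndMultiply := by
  intro n _ hpre
  unfold Spec_sumAndMultiply
  obtain ⟨m, rfl⟩ : ∃ m : Nat, n = (m : Int) := ⟨n.toNat, (Int.toNat_of_nonneg hpre).symm⟩
  unfold sumAndMultiply sumAndMultiply_alt
  by_cases hm : m = 0
  · subst hm
    rw [if_pos (by norm_num)]
    rw [altLoop_spec 0 0 1 0]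
    simp [Fz_zero, Vv, Sv, pyIntDigits]
  · rw [if_neg (by exact_mod_cast hm)]
    have hchars : PySem.Int.toChars (m : Int) = Nat.toDigits 10 m := by
      rw [PySem.Int.toChars]
      rw [if_neg (by simp)]
      simp
    rw [hchars, replace_zero_filter]
    show Vv (Fz m) * ((Fz m).foldl (fun a c => a + (PySem.Int.ofChars? [c]).getD 0) 0)
        = (altLoop (m : Int) 0 1 0).1 * (altLoop (m : Int) 0 1 0).2
    rw [ans_eq_Sv, altLoop_spec m 0 1 0]
    simp
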